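-- pv_equiv track=rewrite | github.com/sproutsai-engg/coding_question_generator | json_files/python_codes/Q_1310.py | water_plants
-- ===== SOURCE A (Python) =====
-- def water_plants(plants, capacity):
--     steps = 0
--     water_left = 0
--
--     for i, plant in enumerate(plants):
--         if water_left < plant:
--             steps += 2 * i + 1  # Refill the watering can
--             water_left = capacity
--         water_left -= plant
--         steps += 1  # Move to the next plant
--
--     return steps
-- ===== SOURCE B (Python) =====
-- def water_plants(plants, capacity):
--     # Prefix sums of water demanded so far.
--     prefix = [0]
--     total = 0
--     for p in plants:
--         total += p
--         prefix.append(total)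
--     # threshold = prefix-sum level at which the can runs dry; refill at i
--     # iff prefix[i+1] exceeds it, then it becomes prefix[i] + capacity.
--     steps = len(plants)
--     threshold = 0
--     for i, (before, after) in enumerate(zip(prefix, prefix[1:])):
--         if after > threshold:
--             steps += 2 * i + 1
--             threshold = before + capacity
--     return steps
-- ===== Notes on version B (the rewrite author's own statement) =====
-- stated objective: alternative
-- what changed: B drops A's water_left simulation entirely: it computes prefix sums of demand once, then decides each refill by comparing the prefix sum against a running threshold (prefix[i]+capacity after a refill), summing 2*i+1 for refill points after counting one step per plant.
import Mathlib
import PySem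

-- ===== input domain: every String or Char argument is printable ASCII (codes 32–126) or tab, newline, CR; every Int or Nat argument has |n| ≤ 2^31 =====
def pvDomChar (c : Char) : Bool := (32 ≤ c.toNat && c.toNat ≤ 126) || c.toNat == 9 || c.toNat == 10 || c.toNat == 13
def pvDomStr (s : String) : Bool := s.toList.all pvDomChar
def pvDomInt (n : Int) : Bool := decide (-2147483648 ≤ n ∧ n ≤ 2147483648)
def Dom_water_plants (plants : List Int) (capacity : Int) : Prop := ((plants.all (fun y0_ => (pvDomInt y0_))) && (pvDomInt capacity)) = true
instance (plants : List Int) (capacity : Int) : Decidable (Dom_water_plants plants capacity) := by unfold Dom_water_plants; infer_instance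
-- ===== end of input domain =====

-- B replaces A's water_left simulation by prefix sums with a refill threshold (objective: alternative algorithm, same cost).

-- ===== PORT A =====
def water_plants (plants : List Int) (capacity : Int) : Int :=
  let st := (PySem.List.enumerate plants).foldl
    (fun (s : Int × Int) (p : Int × Int) =>
      let s1 := if s.2 < p.2 then (s.1 + (2 * p.1 + 1), capacity) else s
      (s1.1 + 1, s1.2 - p.2)) (0, 0)
  st.1

-- ===== PORT B =====
def water_plants_alt (plants : List Int) (capacity : Int) : Int :=
  -- prefix sums of demand (the port keeps Source B's (prefix, total) pair)
  let pt := plants.foldl (fun (s : List Int × Int) (p : Int) => (s.1 ++ [s.2 + p], s.2 + p)) ([0], 0)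
  let pre := pt.1
  -- enumerate(zip(prefix, prefix[1:])); state = (steps, threshold)
  let st := (PySem.List.enumerate (pre.zip (PySem.List.slice pre (some 1) none))).foldl
    (fun (s : Int × Int) (q : Int × (Int × Int)) =>
      if q.2.2 > s.2 then (s.1 + (2 * q.1 + 1), q.2.1 + capacity) else s)
    ((plants.length : Int), 0)
  st.1

-- ===== PRECONDITION & SPEC =====
def Spec_water_plants (plants : List Int) (capacity : Int) (out : Int) : Prop := out = water_plants_alt plants capacity
instance (plants : List Int) (capacity : Int) (out : Int) : Decidable (Spec_water_plants plants capacity out) := by unfold Spec_water_plants; infer_instance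

-- ===== CLAIM (what is proved, stated in full; the proofs are below) =====
def Claim_equal_water_plants : Prop := ∀ (plants : List Int) (capacity : Int), Dom_water_plants plants capacity → Spec_water_plants plants capacity (water_plants plants capacity)

-- ===== LEMMAS AND PROOFS =====

def pvFoldA (capacity : Int) (l : List (Int × Int)) (s : Int × Int) : Int × Int :=
  l.foldl (fun (s : Int × Int) (p : Int × Int) =>
    let s1 := if s.2 < p.2 then (s.1 + (2 * p.1 + 1), capacity) else s
    (s1.1 + 1, s1.2 - p.2)) s

def pvFoldB (capacity : Int) (l : List (Int × (Int × Int))) (s : Int × Int) : Int × Int :=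
  l.foldl (fun (s : Int × Int) (q : Int × (Int × Int)) =>
    if q.2.2 > s.2 then (s.1 + (2 * q.1 + 1), q.2.1 + capacity) else s) s

-- the running prefix sums (tail of Source B's prefix list)
def pvScan (b : Int) : List Int → List Int
  | [] => []
  | p :: ps => (b + p) :: pvScan (b + p) ps

-- consecutive pairs of the prefix list starting at b
def pvPairs (b : Int) : List Int → List (Int × Int)
  | [] => []
  | p :: ps => (b, b + p) :: pvPairs (b + p) ps

theorem pvPrefix_build (l : List Int) (acc : List Int) (b : Int) :
    l.foldl (fun (s : List Int × Int) (p : Int) => (s.1 ++ [s.2 + p], s.2 + p)) (acc, b)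
      = (acc ++ pvScan b l, b + l.sum) := by
  induction l generalizing acc b with
  | nil => simp [pvScan]
  | cons p ps ih => simp [pvScan, ih]; ring

theorem pvZip_pairs (b : Int) (l : List Int) :
    (b :: pvScan b l).zip (pvScan b l) = pvPairs b l := by
  induction l generalizing b with
  | nil => simp [pvScan, pvPairs]
  | cons p ps ih => simp [pvScan, pvPairs, ih]

theorem pvMain (capacity : Int) (l : List Int) (i0 steps thr b : Int) :
    (pvFoldA capacity (PySem.List.enumerate l i0) (steps, thr - b)).1
      = (pvFoldB capacity (PySem.List.enumerate (pvPairs b l) i0) (steps + l.length, thr)).1 := by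
  induction l generalizing i0 steps thr b with
  | nil => simp [pvFoldA, pvFoldB, pvPairs, PySem.List.enumerate_nil]
  | cons p ps ih =>
    rw [pvPairs, PySem.List.enumerate_cons, PySem.List.enumerate_cons]
    simp only [pvFoldA, pvFoldB, List.foldl_cons]
    by_cases h : thr - b < p
    · have h' : b + p > thr := by omega
      simp only [h, h', ite_true]
      have := ih (i0 + 1) (steps + (2 * i0 + 1) + 1) (b + capacity) (b + p)
      have e1 : capacity - p = b + capacity - (b + p) := by ring
      rw [e1]
      simpa [pvFoldA, pvFoldB, add_comm, add_left_comm, add_assoc] using this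
    · have h' : ¬ (b + p > thr) := by omega
      simp only [h, h', ite_false]
      have := ih (i0 + 1) (steps + 1) thr (b + p)
      have e1 : thr - b - p = thr - (b + p) := by ring
      rw [e1]
      simpa [pvFoldA, pvFoldB, add_comm, add_left_comm, add_assoc] using this

-- ===== VERDICT (by name: the statement is the Claim_ definition above) =====
theorem water_plants_spec : Claim_equal_water_plants := by
  intro plants capacity _
  show water_plants plants capacity = water_plants_alt plants capacity
  simp only [water_plants, water_plants_alt]
  rw [pvPrefix_build plants [0] 0]
  have hzip : (([0] ++ pvScan 0 plants).zip
      (PySem.List.slice ([0] ++ pvScan 0 plants) (some 1) none)) = pvPairs 0 plants := by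
    rw [PySem.List.slice_from_one]
    simpa using pvZip_pairs 0 plants
  rw [hzip]
  have := pvMain capacity plants 0 0 0 0
  simpa [pvFoldA, pvFoldB] using this
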